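-- pv_equiv track=rewrite | github.com/archit111/pythonProject | sumof3digit.py | sumofelementsktimes
-- ===== SOURCE A (Python) =====
-- def sumofelementsktimes(ar,k):
--     sum=0
--     visited=[]
--     for i in range (len(ar)):
--         c=0
--         if ar[i] not in visited:
--             visited.append(ar[i])
--             c=ar.count(ar[i])
--             if (c==k):
--                 sum+=ar[i]
--
--     return sum
-- ===== SOURCE B (Python) =====
-- def sumofelementsktimes(ar, k):
--     counts = {}
--     for x in ar:
--         counts[x] = counts.get(x, 0) + 1
--     return sum(v for v, c in counts.items() if c == k)
-- ===== Notes on version B (the rewrite author's own statement) =====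
-- stated objective: faster
-- what changed: Replaces the quadratic visited-list loop with repeated ar.count scans by a single-pass frequency dictionary, then sums the keys whose count equals k.
import Mathlib
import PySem

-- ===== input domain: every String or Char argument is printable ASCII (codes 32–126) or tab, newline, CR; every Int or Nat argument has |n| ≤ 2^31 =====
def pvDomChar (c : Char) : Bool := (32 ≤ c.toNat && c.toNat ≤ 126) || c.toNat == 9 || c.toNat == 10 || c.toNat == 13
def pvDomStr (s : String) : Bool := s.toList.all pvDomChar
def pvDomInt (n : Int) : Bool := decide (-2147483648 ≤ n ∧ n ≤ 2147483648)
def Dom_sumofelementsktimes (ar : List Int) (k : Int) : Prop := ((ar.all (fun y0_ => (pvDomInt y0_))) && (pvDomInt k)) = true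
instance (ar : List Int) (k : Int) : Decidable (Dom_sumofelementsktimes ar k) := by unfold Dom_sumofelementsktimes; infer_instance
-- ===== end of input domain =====

-- B replaces A's quadratic visited-list loop (an ar.count scan per new element) by a
-- one-pass frequency dictionary summed afterwards; objective: faster (asymptotic).


-- ===== PORT A =====
def sumofelementsktimes (ar : List Int) (k : Int) : Int :=
  let st :=
    (PySem.List.pyRange 0 (PySem.List.len ar) 1).foldl
      (fun (st : Int × List Int) i =>
        -- c = 0 is immediately overwritten inside the branch in A; the index i is
        -- always in range, so ar[i] is pyGetD with an unused default
        let x := PySem.List.pyGetD ar i 0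
        if st.2.contains x then st
        else
          let visited := st.2 ++ [x]
          let c : Int := (ar.count x : Int)
          if c == k then (st.1 + x, visited) else (st.1, visited))
      (0, ([] : List Int))
  st.1

-- ===== PORT B =====
def sumofelementsktimes_alt (ar : List Int) (k : Int) : Int :=
  let counts := ar.foldl (fun (d : PySem.Dict Int Int) x => d.insert x (d.getD x 0 + 1)) PySem.Dict.empty
  ((counts.items.filter (fun p => p.2 == k)).map (fun p => p.1)).sum

-- ===== PRECONDITION & SPEC =====
def Spec_sumofelementsktimes (ar : List Int) (k : Int) (out : Int) : Prop := out = sumofelementsktimes_alt ar k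
instance (ar : List Int) (k : Int) (out : Int) : Decidable (Spec_sumofelementsktimes ar k out) := by unfold Spec_sumofelementsktimes; infer_instance

-- ===== CLAIM (what is proved, stated in full; the proofs are below) =====
def Claim_equal_sumofelementsktimes : Prop := ∀ (ar : List Int) (k : Int), Dom_sumofelementsktimes ar k → Spec_sumofelementsktimes ar k (sumofelementsktimes ar k)

-- ===== LEMMAS AND PROOFS =====

-- the elements of l not in vis, deduplicated by first occurrence, in order
def pvRelNew (vis : List Int) : List Int → List Int
  | [] => []
  | x :: l => if vis.contains x then pvRelNew vis l else x :: pvRelNew (vis ++ [x]) l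

lemma pvRelNew_update : ∀ (l vis : List Int), vis ++ pvRelNew vis l = PySem.Set.update vis l := by
  intro l
  induction l with
  | nil => intro vis; simp [pvRelNew, PySem.Set.update]
  | cons x l ih =>
    intro vis
    by_cases h : vis.contains x
    · have hm : x ∈ vis := by simpa using h
      have ih' := ih vis
      simp only [PySem.Set.update] at ih'
      simp only [pvRelNew, h, if_true, PySem.Set.update, List.foldl_cons, PySem.Set.add]
      split_ifs with hx
      · exact ih'
      · exact absurd (by simpa [PySem.Set.contains] using h) hx
    · have hm : x ∉ vis := by simpa using h
      simp only [pvRelNew, h, Bool.false_eq_true, if_false]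
      rw [show vis ++ (x :: pvRelNew (vis ++ [x]) l) = (vis ++ [x]) ++ pvRelNew (vis ++ [x]) l by simp,
          ih (vis ++ [x])]
      simp [hm]

lemma pvRelNew_nil (l : List Int) : pvRelNew [] l = PySem.Set.ofList l := by
  have h := pvRelNew_update l []
  simpa [PySem.Set.ofList_eq_foldl, PySem.Set.update] using h

lemma pvFoldA (ar : List Int) (k : Int) :
    ∀ (l : List Int) (s : Int) (vis : List Int),
      (l.foldl (fun (st : Int × List Int) x =>
          if st.2.contains x then st
          else
            let visited := st.2 ++ [x]
            let c : Int := (ar.count x : Int)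
            if c == k then (st.1 + x, visited) else (st.1, visited)) (s, vis)).1
        = s + (((pvRelNew vis l).filter (fun v => ((ar.count v : Int) == k))).sum) := by
  intro l
  induction l with
  | nil => intro s vis; simp [pvRelNew]
  | cons x l ih =>
    intro s vis
    by_cases h : vis.contains x
    · simp only [List.foldl_cons, h, if_true, pvRelNew]
      simpa [h] using ih s vis
    · by_cases hc : ((ar.count x : Int) == k)
      · simp only [List.foldl_cons, h, Bool.false_eq_true, if_false, hc, if_true, pvRelNew]
        rw [ih (s + x) (vis ++ [x])]
        simp [hc]
        ring
      · simp only [List.foldl_cons, h, Bool.false_eq_true, if_false, hc, pvRelNew]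
        rw [ih s (vis ++ [x])]
        simp [hc]

theorem pvA_eq (ar : List Int) (k : Int) :
    sumofelementsktimes ar k
      = (((PySem.Set.ofList ar).filter (fun v => ((ar.count v : Int) == k))).sum) := by
  unfold sumofelementsktimes
  rw [PySem.List.foldl_pyRange_zero_pyGetD ar 0
    (f := fun (st : Int × List Int) x =>
      if st.2.contains x then st
      else
        let visited := st.2 ++ [x]
        let c : Int := (ar.count x : Int)
        if c == k then (st.1 + x, visited) else (st.1, visited)) (init := (0, ([] : List Int)))]
  rw [pvFoldA ar k ar 0 []]
  rw [pvRelNew_nil]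
  simp

theorem pvB_eq (ar : List Int) (k : Int) :
    sumofelementsktimes_alt ar k
      = (((PySem.Set.ofList ar).filter (fun v => ((ar.count v : Int) == k))).sum) := by
  unfold sumofelementsktimes_alt
  simp only [PySem.Dict.foldl_insert_getD_add_one_eq_counter, PySem.Dict.items_counter,
    List.filter_map, List.map_map]
  simp [Function.comp_def]

-- ===== VERDICT (by name: the statement is the Claim_ definition above) =====
theorem sumofelementsktimes_spec : Claim_equal_sumofelementsktimes := by
  intro ar k _
  unfold Spec_sumofelementsktimes
  rw [pvA_eq, pvB_eq]
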